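-- pv_equiv track=rewrite | github.com/ZhouningMan/LeetCodePython | sprint/OptimalUtilization.py | optimalUtilization
-- ===== SOURCE A (Python) =====
-- MAX_INT = 2**31 - 1
--
-- def optimalUtilization(a, b, target):
--     def sort_key(v):
--         return v[1], v[0]
--     a.sort(key=sort_key)
--     b.sort(key=sort_key)
--
--     ai = 0
--     bi = len(b) - 1
--     ans = []
--     diff = MAX_INT
--     while ai < len(a) and bi >= 0:
--         a_val = a[ai][1]
--         b_val = b[bi][1]
--         if a_val + b_val > target:
--             bi -= 1
--             continue
--         new_diff = target - a_val - b_val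
--         i = a[ai][0]
--         j = b[bi][0]
--         if new_diff < diff:
--             # create a new list
--             # don't forget to assign new_diff to diff
--             diff = new_diff
--             ans = [[i, j]]
--         elif new_diff == diff:
--             ans.append([i, j])
--         ai += 1
--     return ans
-- ===== SOURCE B (Python) =====
-- MAX_INT = 2**31 - 1
--
-- def optimalUtilization(a, b, target):
--     # Same in-place sorts as the original (callers can observe the mutation).
--     def sort_key(v):
--         return v[1], v[0]
--     a.sort(key=sort_key)
--     b.sort(key=sort_key)
--     b_vals = [v[1] for v in b]
--
--     def bisect_right(arr, x):
--         # hand-written since this module imports nothing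
--         lo, hi = 0, len(arr)
--         while lo < hi:
--             mid = (lo + hi) // 2
--             if x < arr[mid]:
--                 hi = mid
--             else:
--                 lo = mid + 1
--         return lo
--
--     ans = []
--     diff = MAX_INT
--     for u in a:
--         limit = target - u[1]
--         idx = bisect_right(b_vals, limit) - 1
--         if idx < 0:
--             continue
--         new_diff = limit - b_vals[idx]
--         if new_diff < diff:
--             diff = new_diff
--             ans = [[u[0], b[idx][0]]]
--         elif new_diff == diff:
--             ans.append([u[0], b[idx][0]])
--     return ans
-- ===== Notes on version B (the rewrite author's own statement) =====
-- stated objective: alternative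
-- what changed: Replaces the coupled two-pointer sweep (a shared descending b-pointer threaded through the a-loop with continue/early-exit) with an independent per-element binary search: for each a entry a hand-written bisect_right over the sorted b-values finds the best-fitting b directly.
import Mathlib
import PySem

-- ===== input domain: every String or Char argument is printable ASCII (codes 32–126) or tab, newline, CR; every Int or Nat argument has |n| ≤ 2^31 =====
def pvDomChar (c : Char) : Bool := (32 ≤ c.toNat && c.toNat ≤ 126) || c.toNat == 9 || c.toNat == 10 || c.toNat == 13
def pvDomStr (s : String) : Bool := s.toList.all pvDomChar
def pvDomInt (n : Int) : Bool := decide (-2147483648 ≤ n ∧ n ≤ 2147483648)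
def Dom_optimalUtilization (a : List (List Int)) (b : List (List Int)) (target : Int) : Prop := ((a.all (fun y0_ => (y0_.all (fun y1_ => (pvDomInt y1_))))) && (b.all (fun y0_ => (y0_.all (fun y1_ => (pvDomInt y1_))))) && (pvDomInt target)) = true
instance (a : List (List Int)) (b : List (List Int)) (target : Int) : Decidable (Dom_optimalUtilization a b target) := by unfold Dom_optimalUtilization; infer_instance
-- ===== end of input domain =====

-- B replaces A's coupled two-pointer sweep by an independent bisect_right per a-element (alternative
-- algorithm, similar cost); both Pythons sort a and b in place identically, the proof is about the
-- RETURN value (the mutation is the same in both).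

-- ===== PORT A =====
-- list.sort(key=lambda v: (v[1], v[0])): Python's tuple key compares lexicographically = Int ×ₗ Int.
-- Inner indexing v[1]/v[0] is total here via pyGetD; exact under Pre_ (all inner lists have length ≥ 2).
def pvSortPairs (xs : List (List Int)) : List (List Int) :=
  PySem.List.sorted xs (fun v => toLex (PySem.List.pyGetD v 1 0, PySem.List.pyGetD v 0 0)) false

-- the while loop of A: state = (remaining suffix of sorted a, bi, diff, ans)
def pvLoopA (M : List (List Int)) (t : Int) : List (List Int) → Int → Int → List (List Int) → List (List Int)
  | [], _, _, ans => ans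
  | u :: rest, bi, diff, ans =>
    if bi < 0 then ans
    else
      let av := PySem.List.pyGetD u 1 0
      let bv := PySem.List.pyGetD (PySem.List.pyGetD M bi ([] : List Int)) 1 0
      if av + bv > t then pvLoopA M t (u :: rest) (bi - 1) diff ans
      else
        let nd := t - av - bv
        let i := PySem.List.pyGetD u 0 0
        let j := PySem.List.pyGetD (PySem.List.pyGetD M bi ([] : List Int)) 0 0
        if nd < diff then pvLoopA M t rest bi nd [[i, j]]
        else if nd = diff then pvLoopA M t rest bi diff (ans ++ [[i, j]])
        else pvLoopA M t rest bi diff ans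
  termination_by S bi _ _ => (S.length, (bi + 1).toNat)
  decreasing_by
  · apply Prod.Lex.right; omega
  · apply Prod.Lex.left; simp only [List.length_cons]; omega
  · apply Prod.Lex.left; simp only [List.length_cons]; omega
  · apply Prod.Lex.left; simp only [List.length_cons]; omega

def optimalUtilization (a : List (List Int)) (b : List (List Int)) (target : Int) : List (List Int) :=
  pvLoopA (pvSortPairs b) target (pvSortPairs a) (PySem.List.len (pvSortPairs b) - 1) 2147483647 []

-- ===== PORT B =====
-- hand-written bisect_right of Source B (the module imports nothing, so Source B carries its own)
def pvBisectR (arr : List Int) (x : Int) (lo hi : Nat) : Nat :=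
  if lo < hi then
    let mid := (lo + hi) / 2
    if x < PySem.List.pyGetD arr (mid : Int) 0 then pvBisectR arr x lo mid
    else pvBisectR arr x (mid + 1) hi
  else lo
  termination_by hi - lo
  decreasing_by all_goals omega

-- the body of Source B's for-loop; state = (diff, ans)
def pvStepB (M : List (List Int)) (vals : List Int) (t : Int)
    (s : Int × List (List Int)) (u : List Int) : Int × List (List Int) :=
  let limit := t - PySem.List.pyGetD u 1 0
  let idx : Int := (pvBisectR vals limit 0 vals.length : Int) - 1
  if idx < 0 then s
  else
    let nd := limit - PySem.List.pyGetD vals idx 0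
    if nd < s.1 then (nd, [[PySem.List.pyGetD u 0 0, PySem.List.pyGetD (PySem.List.pyGetD M idx ([] : List Int)) 0 0]])
    else if nd = s.1 then (s.1, s.2 ++ [[PySem.List.pyGetD u 0 0, PySem.List.pyGetD (PySem.List.pyGetD M idx ([] : List Int)) 0 0]])
    else s

def optimalUtilization_alt (a : List (List Int)) (b : List (List Int)) (target : Int) : List (List Int) :=
  ((pvSortPairs a).foldl
    (pvStepB (pvSortPairs b) ((pvSortPairs b).map (fun v => PySem.List.pyGetD v 1 0)) target)
    (2147483647, [])).2

-- ===== PRECONDITION & SPEC =====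
-- Pre_ excludes exactly the inputs on which Python A raises IndexError (an inner list with
-- fewer than 2 elements, hit by the sort key or by v[0]/v[1]).
def Pre_optimalUtilization (a : List (List Int)) (b : List (List Int)) (target : Int) : Prop :=
  (∀ v ∈ a, 2 ≤ v.length) ∧ (∀ v ∈ b, 2 ≤ v.length)
instance (a : List (List Int)) (b : List (List Int)) (target : Int) : Decidable (Pre_optimalUtilization a b target) := by unfold Pre_optimalUtilization; infer_instance

def pvWitness_optimalUtilization : List (List Int) × List (List Int) × Int := ([[1, 2]], [[3, 4]], 5)

def Spec_optimalUtilization (a : List (List Int)) (b : List (List Int)) (target : Int) (out : List (List Int)) : Prop := out = optimalUtilization_alt a b target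
instance (a : List (List Int)) (b : List (List Int)) (target : Int) (out : List (List Int)) : Decidable (Spec_optimalUtilization a b target out) := by unfold Spec_optimalUtilization; infer_instance

-- ===== CLAIM (what is proved, stated in full; the proofs are below) =====
def Claim_equal_optimalUtilization : Prop := ∀ (a : List (List Int)) (b : List (List Int)) (target : Int), Dom_optimalUtilization a b target → Pre_optimalUtilization a b target → Spec_optimalUtilization a b target (optimalUtilization a b target)

-- ===== LEMMAS AND PROOFS =====

-- value of an entry (a[i][1]), the sort's primary key
def pvVal (v : List Int) : Int := PySem.List.pyGetD v 1 0

-- Source B's binary search returns the insertion point: everything below it is ≤ x, everything from it on is > x.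
lemma pvBisectR_spec (vals : List Int) (hvs : vals.Pairwise (· ≤ ·)) (x : Int) :
    ∀ (lo hi : Nat), lo ≤ hi → hi ≤ vals.length →
    (∀ k, k < lo → (hk : k < vals.length) → vals[k] ≤ x) →
    (∀ k, hi ≤ k → (hk : k < vals.length) → x < vals[k]) →
    pvBisectR vals x lo hi ≤ vals.length ∧
    (∀ k, k < pvBisectR vals x lo hi → (hk : k < vals.length) → vals[k] ≤ x) ∧
    (∀ k, pvBisectR vals x lo hi ≤ k → (hk : k < vals.length) → x < vals[k]) := by
  have mono : ∀ (p q : Nat) (hq : q < vals.length) (hpq : p ≤ q),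
      vals[p]'(lt_of_le_of_lt hpq hq) ≤ vals[q] := by
    intro p q hq hpq
    rcases eq_or_lt_of_le hpq with rfl | h
    · exact le_rfl
    · exact List.pairwise_iff_getElem.mp hvs p q _ hq h
  suffices H : ∀ (d lo hi : Nat), hi - lo ≤ d → lo ≤ hi → hi ≤ vals.length →
      (∀ k, k < lo → (hk : k < vals.length) → vals[k] ≤ x) →
      (∀ k, hi ≤ k → (hk : k < vals.length) → x < vals[k]) →
      pvBisectR vals x lo hi ≤ vals.length ∧
      (∀ k, k < pvBisectR vals x lo hi → (hk : k < vals.length) → vals[k] ≤ x) ∧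
      (∀ k, pvBisectR vals x lo hi ≤ k → (hk : k < vals.length) → x < vals[k]) by
    exact fun lo hi h1 h2 h3 h4 => H (hi - lo) lo hi le_rfl h1 h2 h3 h4
  intro d
  induction d with
  | zero =>
    intro lo hi hd hlohi hhilen hlow hhigh
    have hnlt : ¬ lo < hi := by omega
    rw [pvBisectR, if_neg hnlt]
    exact ⟨by omega, hlow, fun k hk => hhigh k (by omega)⟩
  | succ d ih =>
    intro lo hi hd hlohi hhilen hlow hhigh
    by_cases hlt : lo < hi
    · rw [pvBisectR, if_pos hlt]
      have hmid2 : (lo + hi) / 2 < hi := by omega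
      have hmlen : (lo + hi) / 2 < vals.length := by omega
      have hget : PySem.List.pyGetD vals (((lo + hi) / 2 : Nat) : Int) 0 = vals[(lo + hi) / 2] := by
        rw [PySem.List.pyGetD_natCast, List.getD_eq_getElem _ _ hmlen]
      simp only [hget]
      by_cases hx : x < vals[(lo + hi) / 2]
      · rw [if_pos hx]
        exact ih lo ((lo + hi) / 2) (by omega) (by omega) (by omega) hlow
          (fun k hk hklen => lt_of_lt_of_le hx (mono _ k hklen hk))
      · rw [if_neg hx]
        exact ih ((lo + hi) / 2 + 1) hi (by omega) (by omega) hhilen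
          (fun k hk hklen => le_trans (mono k _ hmlen (by omega)) (not_lt.mp hx)) hhigh
    · rw [pvBisectR, if_neg hlt]
      exact ⟨by omega, hlow, fun k hk => hhigh k (by omega)⟩

-- main loop equivalence: A's two-pointer loop over suffix S with pointer bi agrees with B's fold,
-- given that every index above bi is already too large for every remaining element of S.
lemma pvMain (M : List (List Int)) (t : Int)
    (hvs : (M.map pvVal).Pairwise (· ≤ ·)) :
    ∀ (S : List (List Int)) (bi diff : Int) (ans : List (List Int)),
    bi < (M.length : Int) →
    S.Pairwise (fun u v => pvVal u ≤ pvVal v) →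
    (∀ u ∈ S, ∀ k : Nat, (hk : k < M.length) → bi < (k : Int) → t - pvVal u < pvVal M[k]) →
    pvLoopA M t S bi diff ans = (S.foldl (pvStepB M (M.map pvVal) t) (diff, ans)).2 := by
  suffices H : ∀ (n : Nat) (S : List (List Int)) (bi diff : Int) (ans : List (List Int)),
      S.length + (bi + 1).toNat ≤ n →
      bi < (M.length : Int) →
      S.Pairwise (fun u v => pvVal u ≤ pvVal v) →
      (∀ u ∈ S, ∀ k : Nat, (hk : k < M.length) → bi < (k : Int) → t - pvVal u < pvVal M[k]) →
      pvLoopA M t S bi diff ans = (S.foldl (pvStepB M (M.map pvVal) t) (diff, ans)).2 by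
    exact fun S bi diff ans h1 h2 h3 => H _ S bi diff ans le_rfl h1 h2 h3
  intro n
  induction n with
  | zero =>
    intro S bi diff ans hn hbi hSp hinv
    have hS : S = [] := by cases S <;> simp_all
    subst hS
    rw [pvLoopA]
    rfl
  | succ n ih =>
    intro S bi diff ans hn hbi hSp hinv
    match S with
    | [] => rw [pvLoopA]; rfl
    | u :: rest =>
      rw [pvLoopA]
      by_cases hneg : bi < 0
      · rw [if_pos hneg]
        have hstep : ∀ x ∈ u :: rest, ∀ acc : Int × List (List Int),
            pvStepB M (M.map pvVal) t acc x = acc := by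
          intro x hx acc
          have hr0 : pvBisectR (M.map pvVal) (t - PySem.List.pyGetD x 1 0) 0
              (M.map pvVal).length = 0 := by
            obtain ⟨hr1, hr2, hr3⟩ := pvBisectR_spec (M.map pvVal) hvs
              (t - PySem.List.pyGetD x 1 0) 0 (M.map pvVal).length (Nat.zero_le _) le_rfl
              (by omega) (by intro k hk hklen; omega)
            by_contra hne
            have h0len : 0 < (M.map pvVal).length := by omega
            have hle := hr2 0 (by omega) h0len
            rw [List.getElem_map] at hle
            have hgt := hinv x hx 0 (by simpa using h0len) (by omega)
            exact absurd hle (not_le.mpr hgt)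
          simp only [pvStepB, hr0]
          norm_num
        rw [PySem.List.foldl_congr_mem' (u :: rest) _ (fun acc _ => acc) (diff, ans) hstep,
            PySem.List.foldl_ignore]
      · rw [if_neg hneg]
        have hbi0 : 0 ≤ bi := by omega
        have hk0 : bi.toNat < M.length := by omega
        have hMget : PySem.List.pyGetD M bi ([] : List Int) = M[bi.toNat] :=
          PySem.List.pyGetD_eq_getElem M _ hbi0 (by omega)
        by_cases hgt : PySem.List.pyGetD u 1 0
            + PySem.List.pyGetD (PySem.List.pyGetD M bi ([] : List Int)) 1 0 > t
        · rw [if_pos hgt]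
          refine ih (u :: rest) (bi - 1) diff ans (by simp only [List.length_cons] at hn ⊢; omega)
            (by omega) hSp ?_
          intro x hx k hk hbik
          by_cases hkbi : (k : Int) = bi
          · have hkeq : k = bi.toNat := by omega
            subst hkeq
            have hux : pvVal u ≤ pvVal x := by
              rcases hx with _ | hx
              · exact le_rfl
              · exact (List.pairwise_cons.mp hSp).1 x (by assumption)
            have : t - pvVal u < pvVal M[bi.toNat] := by
              rw [hMget] at hgt
              simp only [pvVal] at *
              omega
            simp only [pvVal] at *
            omega
          · exact hinv x hx k hk (by omega)
        · rw [if_neg hgt]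
          have hlenmap : (M.map pvVal).length = M.length := List.length_map ..
          -- the binary search lands exactly on bi
          have hr : pvBisectR (M.map pvVal) (t - PySem.List.pyGetD u 1 0) 0
              (M.map pvVal).length = bi.toNat + 1 := by
            obtain ⟨hr1, hr2, hr3⟩ := pvBisectR_spec (M.map pvVal) hvs
              (t - PySem.List.pyGetD u 1 0) 0 (M.map pvVal).length (Nat.zero_le _) le_rfl
              (by omega) (by intro k hk hklen; omega)
            by_contra hne
            rcases lt_or_gt_of_ne hne with hlo | hhi
            · have hle := hr3 bi.toNat (by omega) (by omega)
              rw [List.getElem_map] at hle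
              rw [hMget] at hgt
              simp only [pvVal] at hle
              omega
            · have hklen : bi.toNat + 1 < (M.map pvVal).length := by omega
              have hle := hr2 (bi.toNat + 1) (by omega) hklen
              rw [List.getElem_map] at hle
              have hgt2 := hinv u (by simp) (bi.toNat + 1) (by omega) (by omega)
              simp only [pvVal] at hle hgt2
              omega
          have hfold : (u :: rest).foldl (pvStepB M (M.map pvVal) t) (diff, ans)
              = rest.foldl (pvStepB M (M.map pvVal) t)
                  (pvStepB M (M.map pvVal) t (diff, ans) u) := List.foldl_cons
          have hidx : ((pvBisectR (M.map pvVal) (t - PySem.List.pyGetD u 1 0) 0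
              (M.map pvVal).length : Nat) : Int) - 1 = bi := by
            rw [hr]; omega
          have hstepu : pvStepB M (M.map pvVal) t (diff, ans) u =
              (if t - PySem.List.pyGetD u 1 0
                    - PySem.List.pyGetD (PySem.List.pyGetD M bi ([] : List Int)) 1 0 < diff then
                 (t - PySem.List.pyGetD u 1 0
                    - PySem.List.pyGetD (PySem.List.pyGetD M bi ([] : List Int)) 1 0,
                  [[PySem.List.pyGetD u 0 0,
                    PySem.List.pyGetD (PySem.List.pyGetD M bi ([] : List Int)) 0 0]])
               else if t - PySem.List.pyGetD u 1 0
                    - PySem.List.pyGetD (PySem.List.pyGetD M bi ([] : List Int)) 1 0 = diff then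
                 (diff, ans ++ [[PySem.List.pyGetD u 0 0,
                    PySem.List.pyGetD (PySem.List.pyGetD M bi ([] : List Int)) 0 0]])
               else (diff, ans)) := by
            simp only [pvStepB, hidx]
            rw [if_neg (by omega)]
            have hvget : PySem.List.pyGetD (M.map pvVal) bi 0 =
                PySem.List.pyGetD (PySem.List.pyGetD M bi ([] : List Int)) 1 0 := by
              rw [PySem.List.pyGetD_eq_getElem _ _ hbi0 (by rw [hlenmap]; omega),
                  List.getElem_map, hMget]
              rfl
            rw [hvget]
          rw [hfold, hstepu]
          have hinv' : ∀ x ∈ rest, ∀ k : Nat, (hk : k < M.length) → bi < (k : Int) →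
              t - pvVal x < pvVal M[k] := fun x hx => hinv x (List.mem_cons_of_mem _ hx)
          have hSp' := (List.pairwise_cons.mp hSp).2
          have hlen' : rest.length + (bi + 1).toNat ≤ n := by
            simp only [List.length_cons] at hn; omega
          by_cases h1 : t - PySem.List.pyGetD u 1 0
              - PySem.List.pyGetD (PySem.List.pyGetD M bi ([] : List Int)) 1 0 < diff
          · rw [if_pos h1, if_pos h1]
            exact ih rest bi _ _ hlen' hbi hSp' hinv'
          · rw [if_neg h1, if_neg h1]
            by_cases h2 : t - PySem.List.pyGetD u 1 0
                - PySem.List.pyGetD (PySem.List.pyGetD M bi ([] : List Int)) 1 0 = diff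
            · rw [if_pos h2, if_pos h2]
              exact ih rest bi _ _ hlen' hbi hSp' hinv'
            · rw [if_neg h2, if_neg h2]
              exact ih rest bi _ _ hlen' hbi hSp' hinv'

-- ===== VERDICT (by name: the statement is the Claim_ definition above) =====
theorem optimalUtilization_spec : Claim_equal_optimalUtilization := by
  intro a b t hdom hpre
  unfold Spec_optimalUtilization optimalUtilization optimalUtilization_alt
  have hvs : ((pvSortPairs b).map pvVal).Pairwise (· ≤ ·) := by
    rw [List.pairwise_map]
    refine (PySem.List.sorted_pairwise b
      (fun v => toLex ((PySem.List.pyGetD v 1 0 : Int), (PySem.List.pyGetD v 0 0 : Int)))).imp ?_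
    intro x y h
    rcases Prod.Lex.le_iff.mp h with h1 | ⟨h1, _⟩
    · exact le_of_lt h1
    · exact le_of_eq h1
  have hSp : (pvSortPairs a).Pairwise (fun u v => pvVal u ≤ pvVal v) := by
    refine (PySem.List.sorted_pairwise a
      (fun v => toLex ((PySem.List.pyGetD v 1 0 : Int), (PySem.List.pyGetD v 0 0 : Int)))).imp ?_
    intro x y h
    rcases Prod.Lex.le_iff.mp h with h1 | ⟨h1, _⟩
    · exact le_of_lt h1
    · exact le_of_eq h1
  rw [PySem.List.len_eq]
  exact pvMain (pvSortPairs b) t hvs (pvSortPairs a) (((pvSortPairs b).length : Int) - 1)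
    2147483647 [] (by omega) hSp (by intro u hu k hk hbk; exfalso; omega)
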